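-- pv_equiv track=rewrite | github.com/NeuroGirl/algorithms-and-data-structure | algorithms-and-data-structures/lab4/task2/src/queue.py | queue_add_del
-- ===== SOURCE A (Python) =====
-- def queue_add_del(n, commands):
--     queue = []
--     deleted_from_queue = []
--     for command in commands:
--         if command[0] == '+':
--             queue.append(command[1:]+"\n")
--         if command[0] == '-':
--             deleted_from_queue.append(queue.pop(0))
--     return deleted_from_queue
-- ===== SOURCE B (Python) =====
-- def queue_add_del(n, commands):
--     adds = [c[1:] + "\n" for c in commands if c[0] == '+']
--     d = sum(1 for c in commands if c[0] == '-')
--     return adds[:d]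
-- ===== Notes on version B (the rewrite author's own statement) =====
-- stated objective: simpler
-- what changed: Instead of simulating the queue with per-command front pops, B collects all '+' payloads in one comprehension, counts the '-' commands, and returns the first d additions by a single slice (valid because a FIFO removes additions in arrival order).
import Mathlib
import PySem

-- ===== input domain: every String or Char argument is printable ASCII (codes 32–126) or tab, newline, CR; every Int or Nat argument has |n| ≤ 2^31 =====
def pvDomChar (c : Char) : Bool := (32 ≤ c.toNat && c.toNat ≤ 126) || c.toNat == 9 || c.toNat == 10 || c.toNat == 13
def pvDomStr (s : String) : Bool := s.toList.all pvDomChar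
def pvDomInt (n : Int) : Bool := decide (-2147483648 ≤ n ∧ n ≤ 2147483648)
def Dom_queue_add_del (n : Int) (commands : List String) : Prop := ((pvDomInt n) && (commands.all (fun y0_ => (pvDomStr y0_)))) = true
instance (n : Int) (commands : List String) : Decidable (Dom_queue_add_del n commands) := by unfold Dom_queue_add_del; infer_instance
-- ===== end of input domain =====

-- B replaces A's queue simulation (append / pop(0) per command) by one comprehension of all
-- '+' payloads, a count d of the '-' commands, and a final slice adds[:d]; simpler, return value only.

-- ===== PORT A =====
-- one step of A's loop; none = IndexError (empty command, or pop from empty queue)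
def pvStepA (acc : Option (List String × List String)) (command : String) :
    Option (List String × List String) :=
  match acc with
  | none => none
  | some (queue, deleted) =>
    match PySem.Str.pyGet? command 0 with
    | none => none
    | some c0 =>
      let queue := if c0 = '+' then queue ++ [PySem.Str.slice command (some 1) none ++ "\n"]
                   else queue
      if c0 = '-' then
        match PySem.List.pop? queue 0 with
        | none => none
        | some (x, queue') => some (queue', deleted ++ [x])
      else some (queue, deleted)

def queue_add_del (n : Int) (commands : List String) : List String :=
  match commands.foldl pvStepA (some ([], [])) with
  | none => []            -- unreachable under Pre_ (Python raises IndexError here)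
  | some (_, deleted) => deleted

-- ===== PORT B =====
def pvIsPlus (c : String) : Bool := PySem.Str.pyGet? c 0 == some '+'     -- c[0] == '+'
def pvIsMinus (c : String) : Bool := PySem.Str.pyGet? c 0 == some '-'    -- c[0] == '-'
def pvBody (c : String) : String := PySem.Str.slice c (some 1) none ++ "\n"   -- c[1:] + "\n"

def queue_add_del_alt (n : Int) (commands : List String) : List String :=
  let adds := (commands.filter pvIsPlus).map pvBody
  let d := (commands.filter pvIsMinus).length
  PySem.List.slice adds none (some (d : Int))

-- ===== PRECONDITION & SPEC =====
-- Pre_ excludes exactly the inputs where A raises IndexError: an empty command string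
-- (command[0]), or a prefix with more '-' than '+' commands (pop(0) from an empty queue).
def Pre_queue_add_del (n : Int) (commands : List String) : Prop :=
  (∀ c ∈ commands, c ≠ "") ∧
  ∀ i ≤ commands.length,
    ((commands.take i).filter pvIsMinus).length ≤ ((commands.take i).filter pvIsPlus).length
instance (n : Int) (commands : List String) : Decidable (Pre_queue_add_del n commands) := by
  unfold Pre_queue_add_del; infer_instance
def pvWitness_queue_add_del : Int × List String := (3, ["+a", "-", "+b c", "-"])

def Spec_queue_add_del (n : Int) (commands : List String) (out : List String) : Prop := out = queue_add_del_alt n commands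
instance (n : Int) (commands : List String) (out : List String) : Decidable (Spec_queue_add_del n commands out) := by unfold Spec_queue_add_del; infer_instance

-- ===== CLAIM (what is proved, stated in full; the proofs are below) =====
def Claim_equal_queue_add_del : Prop := ∀ (n : Int) (commands : List String), Dom_queue_add_del n commands → Pre_queue_add_del n commands → Spec_queue_add_del n commands (queue_add_del n commands)

-- ===== LEMMAS AND PROOFS =====

theorem pvPyGet?_of_ne_nil {c : String} (h : c ≠ "") :
    ∃ c0, PySem.List.pyGet? c.toList 0 = some c0 := by
  cases hcl : c.toList with
  | nil =>
    exact absurd (by simpa using congrArg String.ofList hcl) h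
  | cons a l =>
    exact ⟨a, by simp [hcl]⟩

-- loop invariant: starting from state (A.drop m, A.take m), A's fold ends in
-- (A'.drop m', A'.take m') where A' appends all '+' payloads of l and m' adds l's '-' count
theorem pvMainA (l : List String) (A : List String) (m : Nat)
    (hne : ∀ c ∈ l, c ≠ "")
    (hbal : ∀ i ≤ l.length,
      m + ((l.take i).filter pvIsMinus).length ≤ A.length + ((l.take i).filter pvIsPlus).length) :
    l.foldl pvStepA (some (A.drop m, A.take m)) =
      some ((A ++ (l.filter pvIsPlus).map pvBody).drop (m + (l.filter pvIsMinus).length),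
            (A ++ (l.filter pvIsPlus).map pvBody).take (m + (l.filter pvIsMinus).length)) := by
  induction l generalizing A m with
  | nil => simp
  | cons c l ih =>
    have hm0 : m ≤ A.length := by simpa using hbal 0 (by omega)
    obtain ⟨c0, hc0⟩ := pvPyGet?_of_ne_nil (hne c (by simp))
    rw [List.foldl_cons]
    by_cases hp : c0 = '+'
    · subst hp
      have hpc : pvIsPlus c = true := by simp [pvIsPlus, hc0]
      have hmc : pvIsMinus c = false := by simp [pvIsMinus, hc0]
      have hstep : pvStepA (some (A.drop m, A.take m)) c =
          some ((A ++ [pvBody c]).drop m, (A ++ [pvBody c]).take m) := by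
        simp only [pvStepA, PySem.Str.pyGet?_eq, PySem.Chars.pyGet?_eq_listPyGet?, hc0, if_pos rfl, if_neg (by decide : ¬ ('+' = '-')),
          pvBody, List.drop_append_of_le_length hm0, List.take_append_of_le_length hm0]
        simp
      rw [hstep, ih (A ++ [pvBody c]) m (fun x hx => hne x (by simp [hx]))
          (fun i hi => by
            have h := hbal (i + 1) (by simpa using hi)
            simp only [List.take_succ_cons, List.filter_cons, hpc, hmc,
              if_true, if_false, Bool.false_eq_true, List.length_cons,
              List.length_append, List.length_cons] at h ⊢
            omega)]
      simp [List.filter_cons, hpc, hmc]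
    · by_cases hmn : c0 = '-'
      · subst hmn
        have hpc : pvIsPlus c = false := by simp [pvIsPlus, hc0]
        have hmc : pvIsMinus c = true := by simp [pvIsMinus, hc0]
        have hlt : m < A.length := by
          have h := hbal 1 (by simp)
          simp only [List.take_succ_cons, List.take_zero, List.filter_cons, hpc, hmc,
            Bool.false_eq_true, if_true, if_false, List.filter_nil, List.length_cons,
            List.length_nil] at h
          omega
        have hdrop : A.drop m = A[m] :: A.drop (m + 1) := List.drop_eq_getElem_cons hlt
        have htake : A.take (m + 1) = A.take m ++ [A[m]] := by
          rw [List.take_succ, List.getElem?_eq_getElem hlt]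
          simp
        have hstep : pvStepA (some (A.drop m, A.take m)) c =
            some (A.drop (m + 1), A.take (m + 1)) := by
          simp only [pvStepA, PySem.Str.pyGet?_eq, PySem.Chars.pyGet?_eq_listPyGet?, hc0, if_neg (by decide : ¬ ('-' = '+')), if_pos rfl, hdrop,
            PySem.List.pop?_zero_cons, htake]
          simp
        rw [hstep, ih A (m + 1) (fun x hx => hne x (by simp [hx]))
            (fun i hi => by
              have h := hbal (i + 1) (by simpa using hi)
              simp only [List.take_succ_cons, List.filter_cons, hpc, hmc,
                if_true, if_false, Bool.false_eq_true, List.length_cons] at h ⊢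
              omega)]
        simp only [List.filter_cons, hpc, hmc, if_true, if_false, Bool.false_eq_true,
          List.length_cons]
        have hx : m + 1 + (List.filter pvIsMinus l).length =
            m + ((List.filter pvIsMinus l).length + 1) := by omega
        rw [hx]
      · have hpc : pvIsPlus c = false := by simp [pvIsPlus, hc0, hp]
        have hmc : pvIsMinus c = false := by simp [pvIsMinus, hc0, hmn]
        have hstep : pvStepA (some (A.drop m, A.take m)) c =
            some (A.drop m, A.take m) := by
          simp only [pvStepA, PySem.Str.pyGet?_eq, PySem.Chars.pyGet?_eq_listPyGet?, hc0, if_neg hp, if_neg hmn]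
        rw [hstep, ih A m (fun x hx => hne x (by simp [hx]))
            (fun i hi => by
              have h := hbal (i + 1) (by simpa using hi)
              simp only [List.take_succ_cons, List.filter_cons, hpc, hmc,
                Bool.false_eq_true, if_false] at h ⊢
              omega)]
        simp [List.filter_cons, hpc, hmc]

-- ===== VERDICT (by name: the statement is the Claim_ definition above) =====
theorem queue_add_del_spec : Claim_equal_queue_add_del := by
  intro n commands _ hpre
  obtain ⟨hne, hbal⟩ := hpre
  show queue_add_del n commands = queue_add_del_alt n commands
  have h := pvMainA commands [] 0 hne (fun i hi => by simpa using hbal i hi)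
  simp only [List.drop_zero, List.take_zero] at h
  simp only [queue_add_del, h, List.nil_append, Nat.zero_add]
  simp only [queue_add_del_alt, PySem.List.slice_to_natCast]
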